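-- pv_equiv track=rewrite | github.com/rionehome/help_me_carry | pkgs/help_me_nlp_first_half/scripts/get_word.py | cut_sentence
-- ===== SOURCE A (Python) =====
-- def cut_sentence(result):
--     verb_count=[]
--     txt_list=[]
--     for num, word_class in enumerate(result):
--         if word_class[1].startswith('VV'):
--             verb_count.append(num)#動詞の格納されているインデックスを獲得
--
--     for num in range(len(verb_count)):
--         if num+1==len(verb_count):
--             txt_list.append(result[verb_count[num]:])
--             break
--         txt_list.append(result[verb_count[num]:verb_count[num+1]])
--
--     return txt_list
-- ===== SOURCE B (Python) =====
-- def cut_sentence(result):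
--     segments = []
--     current = None
--     for tok in result:
--         if tok[1].startswith('VV'):
--             if current is not None:
--                 segments.append(current)
--             current = [tok]
--         elif current is not None:
--             current.append(tok)
--     if current is not None:
--         segments.append(current)
--     return segments
-- ===== Notes on version B (the rewrite author's own statement) =====
-- stated objective: simpler
-- what changed: Replaced the two-pass index-collection-then-slicing approach with a single pass that builds segments incrementally, starting a new segment at each verb token and dropping tokens before the first verb.
import Mathlib
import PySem

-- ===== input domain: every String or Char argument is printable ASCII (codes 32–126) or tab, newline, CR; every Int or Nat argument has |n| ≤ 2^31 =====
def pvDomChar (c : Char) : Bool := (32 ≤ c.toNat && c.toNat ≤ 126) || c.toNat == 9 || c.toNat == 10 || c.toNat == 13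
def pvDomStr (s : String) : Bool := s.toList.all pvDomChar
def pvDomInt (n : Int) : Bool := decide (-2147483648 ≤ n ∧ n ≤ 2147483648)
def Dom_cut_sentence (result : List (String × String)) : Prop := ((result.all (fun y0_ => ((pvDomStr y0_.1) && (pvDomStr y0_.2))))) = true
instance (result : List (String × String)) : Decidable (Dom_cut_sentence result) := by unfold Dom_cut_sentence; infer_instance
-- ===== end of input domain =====

-- B differs from A only in decomposition: a single incremental pass instead of index collection then slicing (objective: simpler).

-- ===== PORT A =====
-- second loop of A: 'for num in range(len(verb_count)): … break' as recursion on num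
def cutLoopA (result : List (String × String)) (vc : List Int) (num : Nat)
    (acc : List (List (String × String))) : List (List (String × String)) :=
  if _h : num < vc.length then
    if num + 1 = vc.length then
      acc ++ [PySem.List.slice result (some (PySem.List.pyGetD vc (num : Int) 0)) none]
    else
      cutLoopA result vc (num + 1)
        (acc ++ [PySem.List.slice result (some (PySem.List.pyGetD vc (num : Int) 0))
                  (some (PySem.List.pyGetD vc ((num : Nat) + 1 : Int) 0))])
  else acc
termination_by vc.length - num

def cut_sentence (result : List (String × String)) : List (List (String × String)) :=
  let verb_count : List Int :=
    (PySem.List.enumerate result 0).foldl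
      (fun vc nw => if PySem.Str.startswith nw.2.2 "VV" then vc ++ [nw.1] else vc) []
  cutLoopA result verb_count 0 []

-- ===== PORT B =====
def cut_sentence_alt (result : List (String × String)) : List (List (String × String)) :=
  let st :=
    result.foldl
      (fun (st : List (List (String × String)) × Option (List (String × String))) tok =>
        if PySem.Str.startswith tok.2 "VV" then
          (match st.2 with
           | some cur => st.1 ++ [cur]
           | none => st.1, some [tok])
        else
          match st.2 with
          | some cur => (st.1, some (cur ++ [tok]))
          | none => st)
      ([], none)
  match st.2 with
  | some cur => st.1 ++ [cur]
  | none => st.1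

-- ===== PRECONDITION & SPEC =====
def Spec_cut_sentence (result : List (String × String)) (out : List (List (String × String))) : Prop := out = cut_sentence_alt result
instance (result : List (String × String)) (out : List (List (String × String))) : Decidable (Spec_cut_sentence result out) := by unfold Spec_cut_sentence; infer_instance

-- ===== CLAIM (what is proved, stated in full; the proofs are below) =====
def Claim_equal_cut_sentence : Prop := ∀ (result : List (String × String)), Dom_cut_sentence result → Spec_cut_sentence result (cut_sentence result)

-- ===== LEMMAS AND PROOFS =====

-- verb predicate
def pvP (t : String × String) : Bool := PySem.Str.startswith t.2 "VV"

-- verb indices as naturals, recursively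
def pvIdx : List (String × String) → List Nat
  | [] => []
  | t :: r => if pvP t then 0 :: (pvIdx r).map (· + 1) else (pvIdx r).map (· + 1)

-- slicing a list at nat indices
def pvSegs (l : List (String × String)) : List Nat → List (List (String × String))
  | [] => []
  | [i] => [l.drop i]
  | i :: j :: rest => (l.drop i).take (j - i) :: pvSegs l (j :: rest)

-- B's recursive characterisation: (pre-first-verb tail, segments)
def pvG : List (String × String) → List (String × String) × List (List (String × String))
  | [] => ([], [])
  | t :: r =>
    let pr := pvG r
    if pvP t then ([], (t :: pr.1) :: pr.2) else (t :: pr.1, pr.2)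

theorem vcIdx_gen (l : List (String × String)) :
    ∀ (s : Int), ((PySem.List.enumerate l s).filter (fun nw => pvP nw.2)).map (·.1)
      = (pvIdx l).map (fun (n : Nat) => s + (n : Int)) := by
  induction l with
  | nil => intro s; rfl
  | cons t r ih =>
    intro s
    rw [PySem.List.enumerate_cons]
    by_cases hp : pvP t
    · rw [List.filter_cons_of_pos (by simpa using hp), List.map_cons]
      rw [ih (s + 1)]
      simp only [pvIdx, hp, if_pos, List.map_cons, List.map_map]
      refine congrArg₂ _ (by ring) ?_
      apply List.map_congr_left
      intro n _
      simp only [Function.comp]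
      push_cast
      ring
    · rw [List.filter_cons_of_neg (by simpa using hp)]
      rw [ih (s + 1)]
      simp only [pvIdx, hp, Bool.false_eq_true, if_neg, not_false_iff, List.map_map]
      apply List.map_congr_left
      intro n _
      simp only [Function.comp]
      push_cast
      ring

theorem vcIdx_eq (l : List (String × String)) :
    ((PySem.List.enumerate l 0).filter (fun nw => pvP nw.2)).map (·.1)
      = (pvIdx l).map (Nat.cast : Nat → Int) := by
  rw [vcIdx_gen l 0]
  apply List.map_congr_left
  intro n _
  ring

theorem pvSegs_shift (t : String × String) (l : List (String × String)) (ns : List Nat) :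
    pvSegs (t :: l) (ns.map (· + 1)) = pvSegs l ns := by
  induction ns with
  | nil => simp [pvSegs]
  | cons i rest ih =>
    cases rest with
    | nil => simp [pvSegs]
    | cons j rest' =>
      simp only [List.map_cons] at ih ⊢
      simp [pvSegs, ih, Nat.add_sub_add_right]

theorem pvG_characterisation (l : List (String × String)) :
    (pvIdx l = [] → pvG l = (l, [])) ∧
    (∀ j rest, pvIdx l = j :: rest → (pvG l).1 = l.take j ∧ (pvG l).2 = pvSegs l (j :: rest)) := by
  induction l with
  | nil => exact ⟨fun _ => rfl, fun j rest h => by simp [pvIdx] at h⟩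
  | cons t r ih =>
    obtain ⟨ihnil, ihcons⟩ := ih
    by_cases hp : pvP t
    · refine ⟨fun h => by simp [pvIdx, hp] at h, ?_⟩
      intro j rest h
      simp only [pvIdx, hp, if_pos] at h
      obtain ⟨hj, hrest⟩ := List.cons.inj h
      subst hj hrest
      cases hir : pvIdx r with
      | nil =>
        have := ihnil hir
        simp [pvG, hp, this, pvSegs]
      | cons j' rest' =>
        obtain ⟨h1, h2⟩ := ihcons j' rest' hir
        have hshift : pvSegs (t :: r) ((j' :: rest').map (· + 1)) = pvSegs r (j' :: rest') :=
          pvSegs_shift t r (j' :: rest')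
        simp only [List.map_cons] at hshift
        simp [pvG, hp, pvSegs, hshift, h1, h2]
    · constructor
      · intro h
        simp only [pvIdx, hp, if_neg, Bool.false_eq_true, not_false_iff, List.map_eq_nil_iff] at h
        have := ihnil h
        simp [pvG, hp, this]
      · intro j rest h
        simp only [pvIdx, hp, if_neg, Bool.false_eq_true, not_false_iff] at h
        cases hir : pvIdx r with
        | nil => simp [hir] at h
        | cons j' rest' =>
          rw [hir] at h
          simp only [List.map_cons] at h
          obtain ⟨hj, hrest⟩ := List.cons.inj h
          obtain ⟨h1, h2⟩ := ihcons j' rest' hir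
          have hshift : pvSegs (t :: r) ((j' :: rest').map (· + 1)) = pvSegs r (j' :: rest') :=
            pvSegs_shift t r (j' :: rest')
          simp only [List.map_cons] at hshift
          subst hj hrest
          refine ⟨?_, ?_⟩
          · simp [pvG, hp, h1, List.take_succ_cons]
          · simp [pvG, hp, h2, hshift]

-- A's loop computes pvSegs on the suffix of the index list
theorem cutLoopA_eq (result : List (String × String)) (ns : List Nat) :
    ∀ (k num : Nat) (acc : List (List (String × String))), ns.length - num = k →
      cutLoopA result (ns.map (Nat.cast : Nat → Int)) num acc
        = acc ++ pvSegs result (ns.drop num) := by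
  intro k
  induction k with
  | zero =>
    intro num acc hk
    rw [cutLoopA, dif_neg (by simp; omega)]
    rw [List.drop_eq_nil_of_le (by omega)]
    simp [pvSegs]
  | succ k ih =>
    intro num acc hk
    have h : num < ns.length := by omega
    rw [cutLoopA, dif_pos (by simpa using h)]
    have hget : PySem.List.pyGetD (ns.map (Nat.cast : Nat → Int)) (num : Int) 0 = (ns[num] : Int) := by
      rw [PySem.List.pyGetD_natCast, List.getD_eq_getElem?_getD, List.getElem?_map,
        List.getElem?_eq_getElem h]
      rfl
    by_cases hl : num + 1 = ns.length
    · rw [if_pos (by simpa using hl)]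
      have hdrop : ns.drop num = [ns[num]] := by
        rw [List.drop_eq_getElem_cons h, List.drop_eq_nil_of_le (by omega)]
      rw [hget, PySem.List.slice_from_natCast, hdrop]
      rfl
    · rw [if_neg (by simpa using hl)]
      have h1 : num + 1 < ns.length := by omega
      have hget1 : PySem.List.pyGetD (ns.map (Nat.cast : Nat → Int)) ((num : Nat) + 1 : Int) 0
          = (ns[num + 1] : Int) := by
        have hc : ((num : Nat) + 1 : Int) = ((num + 1 : Nat) : Int) := by push_cast; ring
        rw [hc, PySem.List.pyGetD_natCast, List.getD_eq_getElem?_getD, List.getElem?_map,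
          List.getElem?_eq_getElem h1]
        rfl
      rw [hget, hget1, ih (num + 1) _ (by omega)]
      have hdrop : ns.drop num = ns[num] :: ns[num + 1] :: ns.drop (num + 2) := by
        rw [List.drop_eq_getElem_cons h, List.drop_eq_getElem_cons h1]
      have hdrop1 : ns.drop (num + 1) = ns[num + 1] :: ns.drop (num + 2) := by
        rw [List.drop_eq_getElem_cons h1]
      rw [hdrop, hdrop1, PySem.List.slice_natCast]
      simp [pvSegs]

theorem cut_sentence_eq_pvG (l : List (String × String)) :
    cut_sentence l = (pvG l).2 := by
  unfold cut_sentence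
  have hvc : (PySem.List.enumerate l 0).foldl
      (fun vc nw => if PySem.Str.startswith nw.2.2 "VV" then vc ++ [nw.1] else vc)
      ([] : List Int)
      = (pvIdx l).map (Nat.cast : Nat → Int) := by
    rw [PySem.List.foldl_append_if
      (fun (nw : Int × String × String) => PySem.Str.startswith nw.2.2 "VV")
      (fun (nw : Int × String × String) => nw.1), List.nil_append]
    exact vcIdx_eq l
  rw [hvc, cutLoopA_eq l (pvIdx l) ((pvIdx l).length - 0) 0 [] rfl]
  simp only [List.drop_zero, List.nil_append]
  obtain ⟨hnil, hcons⟩ := pvG_characterisation l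
  cases h : pvIdx l with
  | nil => rw [hnil h]; rfl
  | cons j rest => exact ((hcons j rest h).2).symm

-- B's fold invariant
theorem alt_fold_eq (l : List (String × String)) :
    ∀ (acc : List (List (String × String))) (cur : Option (List (String × String))),
      (match (l.foldl
        (fun (st : List (List (String × String)) × Option (List (String × String))) tok =>
          if PySem.Str.startswith tok.2 "VV" then
            (match st.2 with
             | some cur => st.1 ++ [cur]
             | none => st.1, some [tok])
          else
            match st.2 with
            | some cur => (st.1, some (cur ++ [tok]))
            | none => st)
        (acc, cur)).2 with
       | some c => (l.foldl
          (fun (st : List (List (String × String)) × Option (List (String × String))) tok =>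
            if PySem.Str.startswith tok.2 "VV" then
              (match st.2 with
               | some cur => st.1 ++ [cur]
               | none => st.1, some [tok])
            else
              match st.2 with
              | some cur => (st.1, some (cur ++ [tok]))
              | none => st)
          (acc, cur)).1 ++ [c]
       | none => (l.foldl
          (fun (st : List (List (String × String)) × Option (List (String × String))) tok =>
            if PySem.Str.startswith tok.2 "VV" then
              (match st.2 with
               | some cur => st.1 ++ [cur]
               | none => st.1, some [tok])
            else
              match st.2 with
              | some cur => (st.1, some (cur ++ [tok]))
              | none => st)
          (acc, cur)).1)
      = (match cur with
         | some c => acc ++ ((c ++ (pvG l).1) :: (pvG l).2)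
         | none => acc ++ (pvG l).2) := by
  induction l with
  | nil =>
    intro acc cur
    cases cur <;> simp [pvG]
  | cons t r ih =>
    intro acc cur
    by_cases hp : pvP t
    · have hp' : PySem.Str.startswith t.2 "VV" = true := hp
      cases cur with
      | none =>
        simp only [List.foldl_cons, hp', if_pos]
        rw [ih acc (some [t])]
        simp [pvG, hp]
      | some c =>
        simp only [List.foldl_cons, hp', if_pos]
        rw [ih (acc ++ [c]) (some [t])]
        simp [pvG, hp]
    · have hp' : PySem.Str.startswith t.2 "VV" = false := by
        simpa [pvP] using hp
      cases cur with
      | none =>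
        simp only [List.foldl_cons, hp', Bool.false_eq_true, if_neg, not_false_iff]
        rw [ih acc none]
        simp [pvG, hp]
      | some c =>
        simp only [List.foldl_cons, hp', Bool.false_eq_true, if_neg, not_false_iff]
        rw [ih acc (some (c ++ [t]))]
        simp [pvG, hp]

theorem cut_sentence_alt_eq_pvG (l : List (String × String)) :
    cut_sentence_alt l = (pvG l).2 := by
  unfold cut_sentence_alt
  simpa using alt_fold_eq l [] none

-- ===== VERDICT (by name: the statement is the Claim_ definition above) =====
theorem cut_sentence_spec : Claim_equal_cut_sentence := by
  intro result _
  unfold Spec_cut_sentence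
  rw [cut_sentence_eq_pvG, cut_sentence_alt_eq_pvG]
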